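-- pv_equiv track=rewrite | github.com/w531t4/fpga_led_display | src/scripts/yosys_sdiff.py | sectionize
-- ===== SOURCE A (Python) =====
-- from typing import List, Optional, NamedTuple, Sequence, Union
--
-- class Header(NamedTuple):
--     data: str
--
-- class Section(NamedTuple):
--     command: str
--     data: str
--
-- def sectionize(data: str) -> List[Union[Section, Header]]:
--     output = list()
--     components = data.split("\nyosys> ")
--     output.append(Header(data=components[0]))
--     for each in components[1:]:
--         command = each.split("\n")[0]
--         content = "\n".join(each.split("\n")[1:])
--         output.append(Section(command=command, data=content))
--     return output
-- ===== SOURCE B (Python) =====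
-- from typing import List, Optional, NamedTuple, Sequence, Union
--
-- class Header(NamedTuple):
--     data: str
--
-- class Section(NamedTuple):
--     command: str
--     data: str
--
-- def sectionize(data: str) -> List[Union[Section, Header]]:
--     # single classifying pass over lines with a running accumulator
--     lines = data.split("\n")
--     out = []
--     cmd: Optional[str] = None
--     buf = [lines[0]]
--     for line in lines[1:]:
--         if line.startswith("yosys> "):
--             out.append(Header(data="\n".join(buf)) if cmd is None
--                        else Section(command=cmd, data="\n".join(buf)))
--             cmd = line[len("yosys> "):]
--             buf = []
--         else:
--             buf.append(line)
--     out.append(Header(data="\n".join(buf)) if cmd is None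
--                else Section(command=cmd, data="\n".join(buf)))
--     return out
-- ===== Notes on version B (the rewrite author's own statement) =====
-- stated objective: alternative
-- what changed: Replaces the two-level delimiter splitting (cut the text into chunks at each newline-preceded command marker, then re-split every chunk at its first newline to separate command from body) by a single classifying pass over the list of lines that maintains a running accumulator and emits the pending header or section whenever a line starts with the command marker.
import Mathlib
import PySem

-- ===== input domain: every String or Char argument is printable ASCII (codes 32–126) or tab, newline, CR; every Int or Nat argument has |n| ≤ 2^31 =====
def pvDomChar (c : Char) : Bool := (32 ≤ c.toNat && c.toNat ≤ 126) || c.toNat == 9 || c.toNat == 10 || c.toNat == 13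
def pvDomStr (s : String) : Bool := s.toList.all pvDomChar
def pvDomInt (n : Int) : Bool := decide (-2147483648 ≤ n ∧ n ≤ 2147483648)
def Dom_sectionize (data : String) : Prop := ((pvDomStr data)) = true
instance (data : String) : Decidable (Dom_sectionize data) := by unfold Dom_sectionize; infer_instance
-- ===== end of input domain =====

-- B replaces A's two-level delimiter split (chunks on "\nyosys> ", each re-split on "\n")
-- by a single classifying pass over the lines with a running accumulator (objective:
-- alternative decomposition, same asymptotic cost).

-- ===== PORT A =====
-- A Header tuple is ported as a one-element list [data], a Section tuple as [command, data].
-- str.split with a nonempty separator never raises and always returns a nonempty list, so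
-- the `.getD []` (split? is none only for an empty separator) and `.headD ""` (components[0])
-- defaults are never taken.
def sectionize (data : String) : List (List String) :=
  let components := (PySem.Str.split? data "\nyosys> ").getD []
  let output : List (List String) := [[components.headD ""]]
  (PySem.List.slice components (some 1) none).foldl
    (fun out each =>
      let command := ((PySem.Str.split? each "\n").getD []).headD ""
      let content := PySem.Str.join "\n" (((PySem.Str.split? each "\n").getD []).drop 1)
      out ++ [[command, content]]) output

-- ===== PORT B =====
-- same tuple encoding; `lines` is nonempty for the same reason, so `.headD ""` (lines[0])
-- is never taken either
def pvEmit (cmd : Option String) (buf : List String) : List String :=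
  match cmd with
  | none => [PySem.Str.join "\n" buf]
  | some c => [c, PySem.Str.join "\n" buf]

def sectionize_alt (data : String) : List (List String) :=
  let lines := (PySem.Str.split? data "\n").getD []
  let st := (PySem.List.slice lines (some 1) none).foldl
    (fun (s : List (List String) × Option String × List String) line =>
      if PySem.Str.startswith line "yosys> " then
        (s.1 ++ [pvEmit s.2.1 s.2.2], some (PySem.Str.slice line (some 7) none), [])
      else
        (s.1, s.2.1, s.2.2 ++ [line]))
    ([], none, [lines.headD ""])
  st.1 ++ [pvEmit st.2.1 st.2.2]

-- ===== PRECONDITION & SPEC =====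
def Spec_sectionize (data : String) (out : List (List String)) : Prop := out = sectionize_alt data
instance (data : String) (out : List (List String)) : Decidable (Spec_sectionize data out) := by unfold Spec_sectionize; infer_instance

-- ===== CLAIM (what is proved, stated in full; the proofs are below) =====
def Claim_equal_sectionize : Prop := ∀ (data : String), Dom_sectionize data → Spec_sectionize data (sectionize data)

-- ===== LEMMAS AND PROOFS =====

-- the separator tail "yosys> " as a character list
def pvYSep : List Char := ['y', 'o', 's', 'y', 's', '>', ' ']

def pvMapHead (f : List Char → List Char) : List (List Char) → List (List Char)
  | [] => []
  | x :: xs => f x :: xs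

def pvSplit (a : Char) (sep' : List Char) (l : List Char) : List (List Char) :=
  match l with
  | [] => [[]]
  | c :: rest =>
    if (a :: sep').isPrefixOf (c :: rest) then
      [] :: pvSplit a sep' (rest.drop sep'.length)
    else
      pvMapHead (c :: ·) (pvSplit a sep' rest)
termination_by l.length

def pvJoin : List (List Char) → List Char
  | [] => []
  | [l] => l
  | l :: ls => l ++ '\n' :: pvJoin ls

lemma pvMapHead_comp (f g : List Char → List Char) (m : List (List Char)) :
    pvMapHead f (pvMapHead g m) = pvMapHead (fun x => f (g x)) m := by
  cases m <;> simp [pvMapHead]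

lemma pvMapHead_nil_append (m : List (List Char)) :
    pvMapHead (fun x => [] ++ x) m = m := by
  cases m <;> simp [pvMapHead]

lemma pvMapHead_id (m : List (List Char)) :
    pvMapHead (fun x => x) m = m := by
  cases m <;> simp [pvMapHead]

lemma pv_go_spec (a : Char) (sep' : List Char) :
  ∀ fuel l cur acc, l.length < fuel →
    PySem.Chars.splitOn.go (a :: sep') fuel l cur acc
      = acc.reverse ++ pvMapHead (fun x => cur.reverse ++ x) (pvSplit a sep' l) := by
  intro fuel
  induction fuel with
  | zero => intro l cur acc h; omega
  | succ n ih =>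
    intro l cur acc h
    cases l with
    | nil => simp [PySem.Chars.splitOn.go, pvSplit, pvMapHead]
    | cons c rest =>
      rw [PySem.Chars.splitOn.go]
      by_cases hp : (a :: sep').isPrefixOf (c :: rest)
      · simp only [hp, if_true]
        rw [ih ((c :: rest).drop (a :: sep').length) [] (cur.reverse :: acc) (by simp at h ⊢; omega)]
        rw [pvSplit]
        simp only [hp, if_true, pvMapHead]
        cases h' : pvSplit a sep' (rest.drop sep'.length) <;> simp [pvMapHead, h']
      · simp only [hp, if_false]
        rw [ih rest (c :: cur) acc (by simp at h; omega)]
        rw [pvSplit]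
        simp only [hp, if_false, pvMapHead_comp]
        cases h' : pvSplit a sep' rest <;> simp [pvMapHead, h']

lemma pv_splitOn_eq (a : Char) (sep' : List Char) (l : List Char) :
    PySem.Chars.splitOn l (a :: sep') = pvSplit a sep' l := by
  rw [PySem.Chars.splitOn, pv_go_spec a sep' (l.length+1) l [] [] (by omega)]
  simp [pvMapHead_nil_append, pvMapHead_id]

lemma pvJoin_cons_cons (l l' : List Char) (ls : List (List Char)) :
    pvJoin (l :: l' :: ls) = l ++ '\n' :: pvJoin (l' :: ls) := by
  simp [pvJoin]

lemma pvJoin_eq_intercalate (ls : List (List Char)) :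
    List.intercalate ['\n'] ls = pvJoin ls := by
  induction ls with
  | nil => simp [pvJoin, List.intercalate]
  | cons l ls ih =>
    cases ls with
    | nil => simp [pvJoin, List.intercalate]
    | cons l' ls' =>
      rw [pvJoin_cons_cons, ← ih]
      rfl

lemma pvSplit_single_nonsep (c b : Char) (r : List Char) (hb : b ≠ c) :
    pvSplit c [] (b :: r) = pvMapHead (b :: ·) (pvSplit c [] r) := by
  rw [pvSplit]
  simp [List.isPrefixOf_iff_prefix, List.cons_prefix_cons]
  intro h
  exact absurd h.symm hb

lemma pvSplit_single_sep (c : Char) (r : List Char) :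
    pvSplit c [] (c :: r) = [] :: pvSplit c [] r := by
  rw [pvSplit]
  simp [List.isPrefixOf_iff_prefix, List.cons_prefix_cons]

lemma pvSplit_single_head (c : Char) :
    ∀ t, ∃ ts, pvSplit c [] t = (t.takeWhile (· ≠ c)) :: ts := by
  intro t
  induction t with
  | nil => exact ⟨[], by simp [pvSplit]⟩
  | cons b r ih =>
    obtain ⟨ts, hts⟩ := ih
    by_cases hb : b = c
    · subst hb
      refine ⟨pvSplit b [] r, ?_⟩
      rw [pvSplit_single_sep]
      simp [List.takeWhile_cons]
    · refine ⟨ts, ?_⟩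
      rw [pvSplit_single_nonsep c b r hb, hts]
      simp [pvMapHead, List.takeWhile_cons, hb]

lemma pvSplit_single_free (c : Char) :
    ∀ t l, l ∈ pvSplit c [] t → c ∉ l := by
  intro t
  induction t with
  | nil => intro l hl; simp [pvSplit] at hl; simp [hl]
  | cons b r ih =>
    intro l hl
    by_cases hb : b = c
    · subst hb
      rw [pvSplit_single_sep] at hl
      rcases List.mem_cons.mp hl with h | h
      · simp [h]
      · exact ih _ h
    · rw [pvSplit_single_nonsep c b r hb] at hl
      rcases h' : pvSplit c [] r with _ | ⟨x, xs⟩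
      · simp [h', pvMapHead] at hl
      · rw [h'] at hl
        simp only [pvMapHead] at hl
        rcases List.mem_cons.mp hl with h | h
        · subst h
          intro hmem
          rcases List.mem_cons.mp hmem with h | h
          · exact hb h.symm
          · exact ih x (by simp [h']) h
        · exact ih _ (by simp [h', h])

lemma pvSplit_single_prepend (c : Char) (w : List Char) (hw : c ∉ w) :
    ∀ t, pvSplit c [] (w ++ t) = pvMapHead (fun x => w ++ x) (pvSplit c [] t) := by
  induction w with
  | nil => intro t; cases h : pvSplit c [] t <;> simp [pvMapHead, h]
  | cons a w' ih =>
    intro t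
    have ha : a ≠ c := by intro h; exact hw (by simp [h])
    rw [List.cons_append, pvSplit_single_nonsep c a (w' ++ t) ha,
      ih (by intro h; exact hw (by simp [h])) t, pvMapHead_comp]
    cases h : pvSplit c [] t <;> simp [pvMapHead, h]

lemma pv_prefix_takeWhile (c : Char) (w : List Char) (hw : c ∉ w) :
    ∀ t, w.isPrefixOf (t.takeWhile (· ≠ c)) = w.isPrefixOf t := by
  induction w with
  | nil => intro t; simp [List.isPrefixOf]
  | cons a w' ih =>
    intro t
    have ha : a ≠ c := by intro h; exact hw (by simp [h])
    cases t with
    | nil => simp [List.takeWhile]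
    | cons b r =>
      by_cases hb : b = c
      · subst hb
        have : ¬ (a :: w' <+: b :: r) := by
          simp [List.cons_prefix_cons]
          intro h; exact absurd h ha
        have h1 : (a :: w').isPrefixOf (b :: r) = false := by
          rw [Bool.eq_false_iff]
          intro h
          exact this (List.isPrefixOf_iff_prefix.mp h)
        have h2 : List.takeWhile (fun x => decide (x ≠ b)) (b :: r) = [] := by
          simp [List.takeWhile_cons]
        rw [h1, h2]
        simp [List.isPrefixOf]
      · simp only [List.takeWhile_cons, decide_eq_true_eq]
        rw [if_pos hb]
        simp only [List.isPrefixOf, ih (by intro h; exact hw (by simp [h])) r]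

def pvGroups (cur : List (List Char)) : List (List Char) → List (List (List Char))
  | [] => [cur]
  | l :: ls =>
    if pvYSep.isPrefixOf l then cur :: pvGroups [l.drop 7] ls
    else pvGroups (cur ++ [l]) ls

def pvRegroup (lls : List (List Char)) : List (List Char) :=
  match lls with
  | [] => []
  | l :: ls => (pvGroups [l] ls).map pvJoin

lemma pvSplit_single_join :
    ∀ ls, ls ≠ [] → (∀ l ∈ ls, '\n' ∉ l) → pvSplit '\n' [] (pvJoin ls) = ls := by
  intro ls
  induction ls with
  | nil => intro h; simp at h
  | cons l ls ih =>
    intro _ hfree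
    have hl : '\n' ∉ l := hfree l (by simp)
    cases ls with
    | nil =>
      have : pvJoin [l] = l ++ [] := by simp [pvJoin]
      rw [this, pvSplit_single_prepend '\n' l hl []]
      simp [pvSplit, pvMapHead]
    | cons l' ls' =>
      rw [pvJoin_cons_cons, pvSplit_single_prepend '\n' l hl,
        pvSplit_single_sep, ih (by simp) (by intro a ha; exact hfree a (by simp [ha]))]
      simp [pvMapHead]

lemma pvGroups_prepend_head (x : List Char) :
    ∀ (ls : List (List Char)) (l : List Char) (cur' : List (List Char)),
      (pvGroups ((x ++ l) :: cur') ls).map pvJoin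
        = pvMapHead (fun h => x ++ h) ((pvGroups (l :: cur') ls).map pvJoin) := by
  intro ls
  induction ls with
  | nil =>
    intro l cur'
    simp [pvGroups, pvMapHead]
    cases cur' <;> simp [pvJoin, pvJoin_cons_cons]
  | cons a ls ih =>
    intro l cur'
    by_cases hb : pvYSep.isPrefixOf a
    · simp only [pvGroups, hb, if_true, List.map_cons, pvMapHead]
      cases cur' <;> simp [pvJoin, pvJoin_cons_cons]
    · simp only [pvGroups, hb, if_false, List.cons_append]
      exact ih l (cur' ++ [a])

lemma pvGroups_empty_first_line :
    ∀ (ls : List (List Char)) (l : List Char) (cur' : List (List Char)),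
      (pvGroups ([] :: l :: cur') ls).map pvJoin
        = pvMapHead (fun h => '\n' :: h) ((pvGroups (l :: cur') ls).map pvJoin) := by
  intro ls
  induction ls with
  | nil =>
    intro l cur'
    simp [pvGroups, pvMapHead, pvJoin_cons_cons]
  | cons a ls ih =>
    intro l cur'
    by_cases hb : pvYSep.isPrefixOf a
    · simp only [pvGroups, hb, if_true, List.map_cons, pvMapHead, pvJoin_cons_cons]
      simp
    · simp only [pvGroups, hb, if_false, List.cons_append]
      exact ih l (cur' ++ [a])

-- main regrouping lemma
lemma pv_main : ∀ (n : Nat) (cs : List Char), cs.length ≤ n →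
    pvSplit '\n' pvYSep cs = pvRegroup (pvSplit '\n' [] cs) := by
  intro n
  induction n with
  | zero =>
    intro cs h
    have : cs = [] := by cases cs <;> simp_all
    subst this
    simp [pvSplit, pvRegroup, pvGroups, pvJoin]
  | succ n ih =>
    intro cs h
    cases cs with
    | nil => simp [pvSplit, pvRegroup, pvGroups, pvJoin]
    | cons c rest =>
      by_cases hp : ('\n' :: pvYSep).isPrefixOf (c :: rest)
      · -- boundary: c = '\n' and rest = pvYSep ++ t
        have hp' := List.isPrefixOf_iff_prefix.mp hp
        rw [List.cons_prefix_cons] at hp'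
        obtain ⟨hc, hw⟩ := hp'
        subst hc
        obtain ⟨t, ht⟩ := hw
        subst ht
        rw [pvSplit]
        simp only [hp, if_true]
        rw [List.drop_left]
        rw [ih t (by simp at h; omega)]
        -- right-hand side
        rw [pvSplit_single_sep,
          pvSplit_single_prepend '\n' pvYSep (by decide) t]
        obtain ⟨ts, hts⟩ := pvSplit_single_head '\n' t
        rw [hts]
        simp only [pvMapHead, pvRegroup, pvGroups,
          (by rw [List.isPrefixOf_iff_prefix]; exact List.prefix_append _ _ :
            pvYSep.isPrefixOf (pvYSep ++ t.takeWhile (· ≠ '\n')) = true), if_true]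
        have h7 : (7 : Nat) = pvYSep.length := by decide
        rw [h7, List.drop_left]
        simp [pvJoin]
      · rw [pvSplit]
        simp only [hp, if_false]
        rw [ih rest (by simp at h; omega)]
        obtain ⟨ts, hts⟩ := pvSplit_single_head '\n' rest
        by_cases hc : c = '\n'
        · subst hc
          have hw : pvYSep.isPrefixOf (rest.takeWhile (· ≠ '\n')) = false := by
            rw [pv_prefix_takeWhile '\n' pvYSep (by decide) rest, Bool.eq_false_iff]
            intro hyes
            exact hp (by
              rw [List.isPrefixOf_iff_prefix, List.cons_prefix_cons]
              exact ⟨rfl, List.isPrefixOf_iff_prefix.mp hyes⟩)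
          rw [pvSplit_single_sep, hts]
          simp only [pvRegroup, pvGroups, hw, if_false, Bool.false_eq_true, List.nil_append]
          have := pvGroups_empty_first_line ts (rest.takeWhile (· ≠ '\n')) []
          simp only [List.singleton_append] at this ⊢
          rw [this]
        · rw [pvSplit_single_nonsep '\n' c rest hc, hts]
          simp only [pvMapHead, pvRegroup]
          have := pvGroups_prepend_head [c] ts (rest.takeWhile (· ≠ '\n')) []
          simp only [List.singleton_append] at this ⊢
          rw [this]
          cases h' : List.map pvJoin (pvGroups [rest.takeWhile (· ≠ '\n')] ts) <;>
            simp [pvMapHead, h']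

lemma pvGroups_inv :
    ∀ (ls : List (List Char)) (cur : List (List Char)), cur ≠ [] →
      (∀ l ∈ cur, '\n' ∉ l) → (∀ l ∈ ls, '\n' ∉ l) →
      ∀ g ∈ pvGroups cur ls, g ≠ [] ∧ ∀ l ∈ g, '\n' ∉ l := by
  intro ls
  induction ls with
  | nil =>
    intro cur hne hcur _ g hg
    simp [pvGroups] at hg
    subst hg
    exact ⟨hne, hcur⟩
  | cons hd tl ih =>
    intro cur hne hcur hls g hg
    by_cases hb : pvYSep.isPrefixOf hd
    · simp only [pvGroups, hb, if_true] at hg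
      rcases List.mem_cons.mp hg with h | h
      · subst h; exact ⟨hne, hcur⟩
      · refine ih [hd.drop 7] (by simp) ?_ (fun l' hl' => hls l' (by simp [hl'])) g h
        intro l' hl'
        simp at hl'
        subst hl'
        intro hmem
        exact hls hd (by simp) (List.mem_of_mem_drop hmem)
    · simp only [pvGroups, hb, if_false] at hg
      refine ih (cur ++ [hd]) (by simp) ?_ (fun l' hl' => hls l' (by simp [hl'])) g hg
      intro l' hl'
      rcases List.mem_append.mp hl' with h | h
      · exact hcur l' h
      · simp at h; subst h; exact hls _ (by simp)

lemma pv_split?_some (s sep : String) (a : Char) (sep' : List Char)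
    (h : sep.toList = a :: sep') :
    ∃ ps, PySem.Str.split? s sep = some ps ∧
      ps.map String.toList = pvSplit a sep' s.toList := by
  have hmap := PySem.Str.split?_map s sep
  have h2 : PySem.Chars.split? s.toList sep.toList
      = some (PySem.Chars.splitOn s.toList sep.toList) := by
    simp [PySem.Chars.split?, h]
  rw [h2, h, pv_splitOn_eq] at hmap
  cases hk : PySem.Str.split? s sep with
  | none => rw [hk] at hmap; simp at hmap
  | some ps =>
    rw [hk] at hmap
    simp at hmap
    exact ⟨ps, rfl, hmap⟩


def pvBgo (cmd : Option String) (buf : List String) : List String → List (List String)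
  | [] => [pvEmit cmd buf]
  | l :: ls =>
    if PySem.Str.startswith l "yosys> " then
      pvEmit cmd buf :: pvBgo (some (PySem.Str.slice l (some 7) none)) [] ls
    else
      pvBgo cmd (buf ++ [l]) ls

def pvRender (gs : List (List (List Char))) : List (List (List Char)) :=
  match gs with
  | [] => []
  | g :: rest => [pvJoin g] :: rest.map (fun g => [g.headD [], pvJoin g.tail])

lemma pv_ysep_toList : ("yosys> " : String).toList = pvYSep := by decide

lemma pv_startswith (l : String) :
    PySem.Str.startswith l "yosys> " = pvYSep.isPrefixOf l.toList := by
  rw [PySem.Str.startswith_eq, PySem.Chars.startswith, pv_ysep_toList]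

lemma pv_slice7 (l : String) :
    (PySem.Str.slice l (some 7) none).toList = l.toList.drop 7 := by
  simp [PySem.Str.toList_slice, PySem.Chars.slice_eq_listSlice,
        PySem.List.slice_from (a := 7) l.toList (by omega)]

lemma pv_join_toList (buf : List String) :
    (PySem.Str.join "\n" buf).toList = pvJoin (buf.map String.toList) := by
  rw [PySem.Str.toList_join, PySem.Chars.join, ← pvJoin_eq_intercalate]
  rfl

lemma pvEmit_toList (cmd : Option String) (buf : List String) :
    (pvEmit cmd buf).map String.toList
      = match cmd with
        | none => [pvJoin (buf.map String.toList)]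
        | some c => [c.toList, pvJoin (buf.map String.toList)] := by
  cases cmd <;> simp [pvEmit, PySem.Str.toList_join, PySem.Chars.join, pvJoin_eq_intercalate]

lemma pvB_foldl :
  ∀ (ls : List String) (out : List (List String)) (cmd : Option String) (buf : List String),
    ((ls.foldl
      (fun (s : List (List String) × Option String × List String) line =>
        if PySem.Str.startswith line "yosys> " then
          (s.1 ++ [pvEmit s.2.1 s.2.2], some (PySem.Str.slice line (some 7) none), [])
        else (s.1, s.2.1, s.2.2 ++ [line])) (out, cmd, buf)).1
      ++ [pvEmit (ls.foldl
      (fun (s : List (List String) × Option String × List String) line =>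
        if PySem.Str.startswith line "yosys> " then
          (s.1 ++ [pvEmit s.2.1 s.2.2], some (PySem.Str.slice line (some 7) none), [])
        else (s.1, s.2.1, s.2.2 ++ [line])) (out, cmd, buf)).2.1
          (ls.foldl
      (fun (s : List (List String) × Option String × List String) line =>
        if PySem.Str.startswith line "yosys> " then
          (s.1 ++ [pvEmit s.2.1 s.2.2], some (PySem.Str.slice line (some 7) none), [])
        else (s.1, s.2.1, s.2.2 ++ [line])) (out, cmd, buf)).2.2])
      = out ++ pvBgo cmd buf ls := by
  intro ls
  induction ls with
  | nil => intro out cmd buf; simp [pvBgo]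
  | cons l ls ih =>
    intro out cmd buf
    cases hs : PySem.Str.startswith l "yosys> " with
    | true =>
      simp only [List.foldl_cons, hs, if_true, pvBgo]
      rw [ih]
      simp
    | false =>
      simp only [List.foldl_cons, hs, Bool.false_eq_true, if_false, pvBgo]
      rw [ih]

lemma pvB_some :
  ∀ (ls : List String) (c : String) (buf : List String),
    (pvBgo (some c) buf ls).map (List.map String.toList)
      = (pvGroups (c.toList :: buf.map String.toList) (ls.map String.toList)).map
          (fun g => [g.headD [], pvJoin g.tail]) := by
  intro ls
  induction ls with
  | nil => intro c buf; simp [pvBgo, pvGroups, pvEmit_toList]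
  | cons l ls ih =>
    intro c buf
    cases hs : pvYSep.isPrefixOf l.toList with
    | true =>
      simp only [pvBgo, pv_startswith, hs, if_true, List.map_cons, pvGroups]
      rw [pvEmit_toList]
      simp only [ih]
      rw [pv_slice7]
      simp
    | false =>
      simp only [pvBgo, pv_startswith, hs, Bool.false_eq_true, if_false, List.map_cons, pvGroups]
      rw [ih]
      simp

lemma pvB_none :
  ∀ (ls : List String) (buf : List String),
    (pvBgo none buf ls).map (List.map String.toList)
      = pvRender (pvGroups (buf.map String.toList) (ls.map String.toList)) := by
  intro ls
  induction ls with
  | nil => intro buf; simp [pvBgo, pvGroups, pvRender, pvEmit_toList]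
  | cons l ls ih =>
    intro buf
    cases hs : pvYSep.isPrefixOf l.toList with
    | true =>
      simp only [pvBgo, pv_startswith, hs, if_true, List.map_cons, pvGroups, pvRender]
      rw [pvEmit_toList, pvB_some]
      rw [pv_slice7]
      simp
    | false =>
      simp only [pvBgo, pv_startswith, hs, Bool.false_eq_true, if_false, List.map_cons, pvGroups]
      rw [ih]
      simp

lemma pvA_chunks :
  ∀ (chs : List String) (gs : List (List (List Char))),
    chs.map String.toList = gs.map pvJoin →
    (∀ g ∈ gs, g ≠ [] ∧ ∀ l ∈ g, '\n' ∉ l) →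
    (chs.map (fun each => [((PySem.Str.split? each "\n").getD []).headD "",
        PySem.Str.join "\n" (((PySem.Str.split? each "\n").getD []).drop 1)])).map
        (List.map String.toList)
      = gs.map (fun g => [g.headD [], pvJoin g.tail]) := by
  intro chs
  induction chs with
  | nil =>
    intro gs hmap _
    cases gs with
    | nil => simp
    | cons g gs => simp at hmap
  | cons ch chs ih =>
    intro gs hmap hinv
    cases gs with
    | nil => simp at hmap
    | cons g gs =>
      simp only [List.map_cons, List.cons.injEq] at hmap
      obtain ⟨hch, hrest⟩ := hmap
      obtain ⟨hgne, hgfree⟩ := hinv g (by simp)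
      obtain ⟨ps, hps, hpsl⟩ := pv_split?_some ch "\n" '\n' [] rfl
      rw [hch, pvSplit_single_join g hgne hgfree] at hpsl
      simp only [List.map_cons, List.cons.injEq]
      constructor
      · rw [hps]
        simp only [Option.getD_some]
        constructor
        · -- head
          cases ps with
          | nil => cases g with
            | nil => exact absurd rfl hgne
            | cons _ _ => simp at hpsl
          | cons p ps' =>
            cases g with
            | nil => simp at hpsl
            | cons gl gs' =>
              simp only [List.map_cons, List.cons.injEq] at hpsl
              simp [hpsl.1]
        · -- joined tail
          rw [pv_join_toList, List.map_drop, hpsl, List.drop_one]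
          simp
      · exact ih gs hrest (fun g' hg' => hinv g' (by simp [hg']))



lemma pvGroups_ne_nil : ∀ (ls : List (List Char)) (cur : List (List Char)),
    pvGroups cur ls ≠ [] := by
  intro ls
  induction ls with
  | nil => intro cur; simp [pvGroups]
  | cons l ls ih =>
    intro cur
    by_cases hb : pvYSep.isPrefixOf l <;> simp [pvGroups, hb, ih]

lemma pv_mapmap_inj (xs ys : List (List String))
    (h : xs.map (List.map String.toList) = ys.map (List.map String.toList)) : xs = ys := by
  refine List.map_injective_iff.mpr (List.map_injective_iff.mpr ?_) h
  intro a b hab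
  exact String.toList_inj.mp hab

theorem pv_final (data : String) : sectionize data = sectionize_alt data := by
  obtain ⟨comps, hcomps, hcompsl⟩ :=
    pv_split?_some data "\nyosys> " '\n' pvYSep (by decide)
  obtain ⟨lns, hlns, hlnsl⟩ := pv_split?_some data "\n" '\n' [] rfl
  obtain ⟨ts, hts⟩ := pvSplit_single_head '\n' data.toList
  -- line lists are '\n'-free
  have hfree := pvSplit_single_free '\n' data.toList
  rw [hts] at hlnsl hfree
  -- decompose the string lines
  cases lns with
  | nil => simp at hlnsl
  | cons lh lt =>
    simp only [List.map_cons, List.cons.injEq] at hlnsl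
    obtain ⟨hlh, hlt⟩ := hlnsl
    -- the groups
    have hmain := pv_main data.toList.length data.toList le_rfl
    rw [hts] at hmain
    rw [hmain] at hcompsl
    simp only [pvRegroup] at hcompsl
    have hinv := pvGroups_inv ts [data.toList.takeWhile (· ≠ '\n')] (by simp)
      (by intro l hl; simp at hl; subst hl; exact hfree _ (by simp))
      (by intro l hl; exact hfree _ (by simp [hl]))
    -- A side
    have hA : (sectionize data).map (List.map String.toList)
        = pvRender (pvGroups [data.toList.takeWhile (· ≠ '\n')] ts) := by
      rw [sectionize]
      simp only [hcomps, Option.getD_some, PySem.List.slice_from_one,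
        PySem.List.foldl_append_singleton_eq_map]
      cases hG : pvGroups [data.toList.takeWhile (· ≠ '\n')] ts with
      | nil => exact absurd hG (pvGroups_ne_nil ts _)
      | cons g0 grest =>
        rw [hG] at hcompsl
        cases comps with
        | nil => simp at hcompsl
        | cons ch0 chrest =>
          simp only [List.map_cons, List.cons.injEq] at hcompsl
          obtain ⟨hch0, hchrest⟩ := hcompsl
          simp only [List.map_cons, List.map_append, pvRender, List.tail_cons,
            List.headD_cons]
          rw [pvA_chunks chrest grest hchrest
            (fun g hg => hinv g (by rw [hG]; simp [hg]))]
          simp [hch0, pvRender]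
    -- B side
    have hB : (sectionize_alt data).map (List.map String.toList)
        = pvRender (pvGroups [data.toList.takeWhile (· ≠ '\n')] ts) := by
      rw [sectionize_alt]
      simp only [hlns, Option.getD_some, PySem.List.slice_from_one, List.tail_cons,
        List.headD_cons]
      rw [pvB_foldl lt [] none [lh]]
      simp only [List.nil_append]
      rw [pvB_none lt [lh]]
      simp only [List.map_cons, List.map_nil, hlh, hlt]
    exact pv_mapmap_inj _ _ (hA.trans hB.symm)

-- ===== VERDICT (by name: the statement is the Claim_ definition above) =====
theorem sectionize_spec : Claim_equal_sectionize := by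
  intro data _
  unfold Spec_sectionize
  exact pv_final data
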